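-- pv_equiv track=rewrite | github.com/Spix737/HackerRankSolns | Subarrays with Given Sum and Bounded Maximum/solution.py | countSubarraysWithSumAndMaxAtMost
-- ===== SOURCE A (Python) =====
-- def countSubarraysWithSumAndMaxAtMost(nums, k, M):
--     """
--     Count all contiguous subarrays whose:
--       - sum equals k
--       - maximum element is <= M
--
--     Optimal strategy:
--       1. Any element > M immediately invalidates a subarray.
--       2. Therefore, split the array into segments separated by elements > M.
--       3. Within each segment, count subarrays whose sum = k using prefix sums.
--     """
--
--     total = 0
--     segment = []
--
--     for x in nums:
--         if x > M:
--             # Element too large. It breaks all contiguous subarrays.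
--             # Process the completed segment and reset it.
--             total += count_subarrays_with_sum(segment, k)
--             segment = []
--         else:
--             # Build a segment containing only values <= M.
--             segment.append(x)
--
--     # Process the last segment after finishing the scan.
--     total += count_subarrays_with_sum(segment, k)
--
--     return total
--
-- def count_subarrays_with_sum(arr, k):
--     """
--     Count subarrays within 'arr' whose sum is exactly k.
--     Uses the classic prefix-sum frequency dictionary.
--
--     Explanation (deep this; it's rudimentarily simple. Once you get it it's genius and simple):
--       prefix[i] = sum(arr[0..i])
--
--       A subarray (i..j) has sum k if:
--
--          prefix[j] - prefix[i-1] = k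
--
--       which is the same as:
--
--          prefix[i-1] = prefix[j] - k
--
--       So for each position j, we look up how many times the value
--       (prefix[j] - k) has appeared before.
--     """
--
--     prefix_counts = {0: 1}  # prefix sum 0 has appeared once (empty prefix)
--     prefix = 0              # running prefix sum
--     count = 0               # total valid subarrays found
--
--     for x in arr:
--         prefix += x
--
--         needed = prefix - k  # the prefix value needed for a match
--
--         # If needed prefix values were seen before, they form valid subarrays.
--         if needed in prefix_counts:
--             count += prefix_counts[needed]
--
--         # Record the current prefix value.
--         prefix_counts[prefix] = prefix_counts.get(prefix, 0) + 1
--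
--     return count
-- ===== SOURCE B (Python) =====
-- def countSubarraysWithSumAndMaxAtMost(nums, k, M):
--     # Single streaming pass: reset prefix state at each element > M instead of
--     # collecting segments into lists and counting them in a second phase.
--     total = 0
--     prefix = 0
--     prefix_counts = {0: 1}
--     for x in nums:
--         if x > M:
--             prefix = 0
--             prefix_counts = {0: 1}
--         else:
--             prefix += x
--             total += prefix_counts.get(prefix - k, 0)
--             prefix_counts[prefix] = prefix_counts.get(prefix, 0) + 1
--     return total
-- ===== Notes on version B (the rewrite author's own statement) =====
-- stated objective: simpler
-- what changed: Replaced A's two-phase decomposition (collect each maximal run of elements <= M into a segment list, then count sum-k subarrays of each segment with a helper) by a single streaming loop with no helper and no segment lists, which resets its prefix sum and prefix-count dict at every element > M.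
import Mathlib
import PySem

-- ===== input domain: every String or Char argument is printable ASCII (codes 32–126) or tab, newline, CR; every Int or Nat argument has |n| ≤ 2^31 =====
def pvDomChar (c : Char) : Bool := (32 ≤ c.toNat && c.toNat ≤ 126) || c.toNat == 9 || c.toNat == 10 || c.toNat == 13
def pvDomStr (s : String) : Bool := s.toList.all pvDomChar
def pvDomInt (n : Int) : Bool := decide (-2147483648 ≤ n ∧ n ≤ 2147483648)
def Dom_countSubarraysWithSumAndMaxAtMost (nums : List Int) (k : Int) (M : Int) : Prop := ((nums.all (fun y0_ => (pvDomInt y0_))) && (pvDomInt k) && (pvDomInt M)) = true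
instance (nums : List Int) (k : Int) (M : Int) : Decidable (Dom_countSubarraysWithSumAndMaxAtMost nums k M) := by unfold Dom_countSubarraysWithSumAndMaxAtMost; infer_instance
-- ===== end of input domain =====

-- B replaces A's two-phase "split into segment lists, then count each with a prefix-sum dict"
-- by one streaming pass whose prefix state resets at every element > M (objective: simpler).


-- ===== PORT A =====
-- helper: count_subarrays_with_sum — one loop step (prefix-count dict, running prefix, count)
def pvInnerStep (k : Int) (s : PySem.Dict Int Int × Int × Int) (x : Int) :
    PySem.Dict Int Int × Int × Int :=
  let pfx := s.2.1 + x
  let needed := pfx - k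
  let count := if s.1.contains needed then s.2.2 + s.1.getD needed 0 else s.2.2
  (s.1.insert pfx (s.1.getD pfx 0 + 1), pfx, count)

-- {0: 1}
def pvD0 : PySem.Dict Int Int := PySem.Dict.ofList [((0 : Int), (1 : Int))]

def pvCountSubarraysWithSum (arr : List Int) (k : Int) : Int :=
  (arr.foldl (pvInnerStep k) (pvD0, 0, 0)).2.2

def countSubarraysWithSumAndMaxAtMost (nums : List Int) (k : Int) (M : Int) : Int :=
  let st := nums.foldl
    (fun (s : Int × List Int) x =>
      if x > M then (s.1 + pvCountSubarraysWithSum s.2 k, ([] : List Int))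
      else (s.1, s.2 ++ [x]))
    (0, [])
  st.1 + pvCountSubarraysWithSum st.2 k

-- ===== PORT B =====
-- one streaming pass; state = (total, pfx, prefix_counts); reset at x > M
def pvAltStep (k : Int) (M : Int) (s : Int × Int × PySem.Dict Int Int) (x : Int) :
    Int × Int × PySem.Dict Int Int :=
  if x > M then (s.1, 0, pvD0)
  else
    let pfx := s.2.1 + x
    let total := s.1 + s.2.2.getD (pfx - k) 0
    (total, pfx, s.2.2.insert pfx (s.2.2.getD pfx 0 + 1))

def countSubarraysWithSumAndMaxAtMost_alt (nums : List Int) (k : Int) (M : Int) : Int :=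
  (nums.foldl (pvAltStep k M) (0, 0, pvD0)).1

-- ===== PRECONDITION & SPEC =====
def Spec_countSubarraysWithSumAndMaxAtMost (nums : List Int) (k : Int) (M : Int) (out : Int) : Prop := out = countSubarraysWithSumAndMaxAtMost_alt nums k M
instance (nums : List Int) (k : Int) (M : Int) (out : Int) : Decidable (Spec_countSubarraysWithSumAndMaxAtMost nums k M out) := by unfold Spec_countSubarraysWithSumAndMaxAtMost; infer_instance

-- ===== CLAIM (what is proved, stated in full; the proofs are below) =====
def Claim_equal_countSubarraysWithSumAndMaxAtMost : Prop := ∀ (nums : List Int) (k : Int) (M : Int), Dom_countSubarraysWithSumAndMaxAtMost nums k M → Spec_countSubarraysWithSumAndMaxAtMost nums k M (countSubarraysWithSumAndMaxAtMost nums k M)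

-- ===== LEMMAS AND PROOFS =====

-- inner fold of count_subarrays_with_sum, as a name for the invariant
def pvF (k : Int) (arr : List Int) : PySem.Dict Int Int × Int × Int :=
  arr.foldl (pvInnerStep k) (pvD0, 0, 0)

lemma pvCountSub_eq (arr : List Int) (k : Int) :
    pvCountSubarraysWithSum arr k = (pvF k arr).2.2 := rfl

-- Python's "if needed in d: c += d[needed]" equals unconditional "c += d.get(needed, 0)"
lemma pvIf_contains (d : PySem.Dict Int Int) (c n : Int) :
    (if d.contains n then c + d.getD n 0 else c) = c + d.getD n 0 := by
  by_cases h : d.contains n = true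
  · simp [h]
  · simp only [Bool.not_eq_true] at h
    simp [h, PySem.Dict.getD_of_not_contains d 0 h]

lemma pvF_concat (k : Int) (arr : List Int) (x : Int) :
    pvF k (arr ++ [x]) = pvInnerStep k (pvF k arr) x := by
  simp [pvF]

-- invariant: B's streaming state after a prefix of the input equals A's accumulated
-- total plus the inner-fold state of the current segment
lemma pvInv (k M : Int) :
    ∀ (nums : List Int) (seg : List Int) (t : Int),
      nums.foldl (pvAltStep k M) (t + (pvF k seg).2.2, (pvF k seg).2.1, (pvF k seg).1)
      = ((nums.foldl (fun (s : Int × List Int) x =>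
            if x > M then (s.1 + pvCountSubarraysWithSum s.2 k, ([] : List Int))
            else (s.1, s.2 ++ [x])) (t, seg)).1
          + pvCountSubarraysWithSum
            (nums.foldl (fun (s : Int × List Int) x =>
              if x > M then (s.1 + pvCountSubarraysWithSum s.2 k, ([] : List Int))
              else (s.1, s.2 ++ [x])) (t, seg)).2 k,
         (pvF k (nums.foldl (fun (s : Int × List Int) x =>
            if x > M then (s.1 + pvCountSubarraysWithSum s.2 k, ([] : List Int))
            else (s.1, s.2 ++ [x])) (t, seg)).2).2.1,
         (pvF k (nums.foldl (fun (s : Int × List Int) x =>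
            if x > M then (s.1 + pvCountSubarraysWithSum s.2 k, ([] : List Int))
            else (s.1, s.2 ++ [x])) (t, seg)).2).1) := by
  intro nums
  induction nums with
  | nil =>
      intro seg t
      simp [pvCountSub_eq]
  | cons x xs ih =>
      intro seg t
      by_cases hx : x > M
      · have hstepB : pvAltStep k M (t + (pvF k seg).2.2, (pvF k seg).2.1, (pvF k seg).1) x
            = (t + (pvF k seg).2.2 + (pvF k []).2.2, (pvF k []).2.1, (pvF k []).1) := by
          simp [pvAltStep, hx, pvF, pvD0]
        simp only [List.foldl_cons, hstepB, if_pos hx]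
        exact ih [] (t + (pvF k seg).2.2)
      · have hstepB : pvAltStep k M (t + (pvF k seg).2.2, (pvF k seg).2.1, (pvF k seg).1) x
            = (t + (pvF k (seg ++ [x])).2.2, (pvF k (seg ++ [x])).2.1, (pvF k (seg ++ [x])).1) := by
          rw [pvF_concat]
          simp only [pvAltStep, if_neg hx, pvInnerStep, pvIf_contains]
          exact congrArg (fun c => (c, (pvF k seg).2.1 + x,
            (pvF k seg).1.insert ((pvF k seg).2.1 + x)
              ((pvF k seg).1.getD ((pvF k seg).2.1 + x) 0 + 1))) (by ring)
        simp only [List.foldl_cons, hstepB, if_neg hx]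
        exact ih (seg ++ [x]) t
-- ===== VERDICT (by name: the statement is the Claim_ definition above) =====
theorem countSubarraysWithSumAndMaxAtMost_spec : Claim_equal_countSubarraysWithSumAndMaxAtMost := by
  intro nums k M _
  unfold Spec_countSubarraysWithSumAndMaxAtMost countSubarraysWithSumAndMaxAtMost
    countSubarraysWithSumAndMaxAtMost_alt
  have h := pvInv k M nums [] 0
  simp only [pvF, List.foldl_nil] at h
  rw [show ((0:Int), (0:Int), pvD0) = ((0:Int) + ((pvD0, (0:Int), (0:Int)) :
    PySem.Dict Int Int × Int × Int).2.2, ((pvD0, (0:Int), (0:Int)) :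
    PySem.Dict Int Int × Int × Int).2.1, ((pvD0, (0:Int), (0:Int)) :
    PySem.Dict Int Int × Int × Int).1) from rfl]
  exact (congrArg Prod.fst h).symm
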